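-- pv_equiv track=rewrite | github.com/alexdelprete/ha-abb-fimer-pvi-vsn-rest | scripts/vsn-mapping-generator/extract_manual_changes.py | compare_data
-- ===== SOURCE A (Python) =====
-- def compare_data(original, edited):
--     """Compare original and edited data, return differences."""
--     changes = {
--         "label": [],
--         "description": [],
--         "display_name": []
--     }
--
--     for sunspec_name in edited:
--         if sunspec_name not in original:
--             continue  # New point in edited file, skip
--
--         orig = original[sunspec_name]
--         edit = edited[sunspec_name]
--
--         # Check Label changes
--         if orig["Label"] != edit["Label"]:
--             changes["label"].append({
--                 "sunspec_name": sunspec_name,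
--                 "vsn700": edit["REST Name (VSN700)"],
--                 "vsn300": edit["REST Name (VSN300)"],
--                 "old": orig["Label"],
--                 "new": edit["Label"]
--             })
--
--         # Check Description changes
--         if orig["Description"] != edit["Description"]:
--             changes["description"].append({
--                 "sunspec_name": sunspec_name,
--                 "vsn700": edit["REST Name (VSN700)"],
--                 "vsn300": edit["REST Name (VSN300)"],
--                 "old": orig["Description"],
--                 "new": edit["Description"]
--             })
--
--         # Check HA Display Name changes
--         if orig["HA Display Name"] != edit["HA Display Name"]:
--             changes["display_name"].append({
--                 "sunspec_name": sunspec_name,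
--                 "vsn700": edit["REST Name (VSN700)"],
--                 "vsn300": edit["REST Name (VSN300)"],
--                 "old": orig["HA Display Name"],
--                 "new": edit["HA Display Name"]
--             })
--
--     return changes
-- ===== SOURCE B (Python) =====
-- def compare_data(original, edited):
--     """Compare original and edited data, return differences."""
--     def field_diffs(field):
--         return [
--             {
--                 "sunspec_name": name,
--                 "vsn700": edit["REST Name (VSN700)"],
--                 "vsn300": edit["REST Name (VSN300)"],
--                 "old": original[name][field],
--                 "new": edit[field],
--             }
--             for name, edit in edited.items()
--             if name in original and original[name][field] != edit[field]
--         ]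
--
--     return {
--         "label": field_diffs("Label"),
--         "description": field_diffs("Description"),
--         "display_name": field_diffs("HA Display Name"),
--     }
-- ===== Notes on version B (the rewrite author's own statement) =====
-- stated objective: simpler
-- what changed: Replaces the single loop that threads a three-list mutable 'changes' accumulator (with three sequential in-place appends per key) by one per-field comprehension: each category is built independently as a filter-and-map pass over edited, so no accumulator state exists at all.
import Mathlib
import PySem

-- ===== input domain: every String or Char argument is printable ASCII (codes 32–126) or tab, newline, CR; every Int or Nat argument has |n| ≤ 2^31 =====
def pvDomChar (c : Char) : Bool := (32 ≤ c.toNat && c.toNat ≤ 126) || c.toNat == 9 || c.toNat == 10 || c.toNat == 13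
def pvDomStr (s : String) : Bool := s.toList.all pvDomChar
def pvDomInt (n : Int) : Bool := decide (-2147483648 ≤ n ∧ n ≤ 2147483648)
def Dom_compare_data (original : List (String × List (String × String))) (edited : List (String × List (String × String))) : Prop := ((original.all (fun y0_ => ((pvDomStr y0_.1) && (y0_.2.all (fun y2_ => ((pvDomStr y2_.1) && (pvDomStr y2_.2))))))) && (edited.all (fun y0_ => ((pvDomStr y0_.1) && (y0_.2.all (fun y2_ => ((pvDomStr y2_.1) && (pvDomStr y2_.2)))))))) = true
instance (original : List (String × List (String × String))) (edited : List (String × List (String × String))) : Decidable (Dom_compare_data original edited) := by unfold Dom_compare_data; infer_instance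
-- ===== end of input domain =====

-- B builds each change category by an independent filter-and-map pass over `edited`
-- instead of A's single loop threading a three-list accumulator; same cost, simpler.
-- ===== PORT A =====

-- d[k] for the inner string dicts; Pre_ guarantees the key is present wherever A evaluates it.
def lkS (d : List (String × String)) (k : String) : String := (d.lookup k).getD ""

-- the body of A's `for sunspec_name in edited` loop, threading the (label, description, display_name) accumulator
def stepA (original edited : List (String × List (String × String)))
    (ch : List (List (String × String)) × List (List (String × String)) × List (List (String × String)))
    (p : String × List (String × String)) :
    List (List (String × String)) × List (List (String × String)) × List (List (String × String)) :=
  match original.lookup p.1 with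
  | none => ch
  | some orig =>
    let edit := (edited.lookup p.1).getD []
    let ch := if lkS orig "Label" ≠ lkS edit "Label" then
        (ch.1 ++ [[("sunspec_name", p.1), ("vsn700", lkS edit "REST Name (VSN700)"),
                   ("vsn300", lkS edit "REST Name (VSN300)"), ("old", lkS orig "Label"),
                   ("new", lkS edit "Label")]], ch.2.1, ch.2.2)
      else ch
    let ch := if lkS orig "Description" ≠ lkS edit "Description" then
        (ch.1, ch.2.1 ++ [[("sunspec_name", p.1), ("vsn700", lkS edit "REST Name (VSN700)"),
                   ("vsn300", lkS edit "REST Name (VSN300)"), ("old", lkS orig "Description"),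
                   ("new", lkS edit "Description")]], ch.2.2)
      else ch
    let ch := if lkS orig "HA Display Name" ≠ lkS edit "HA Display Name" then
        (ch.1, ch.2.1, ch.2.2 ++ [[("sunspec_name", p.1), ("vsn700", lkS edit "REST Name (VSN700)"),
                   ("vsn300", lkS edit "REST Name (VSN300)"), ("old", lkS orig "HA Display Name"),
                   ("new", lkS edit "HA Display Name")]])
      else ch
    ch

def compare_data (original : List (String × List (String × String))) (edited : List (String × List (String × String))) : List (String × List (List (String × String))) :=
  let ch := edited.foldl (stepA original edited) ([], [], [])
  [("label", ch.1), ("description", ch.2.1), ("display_name", ch.2.2)]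

-- ===== PORT B =====

-- one element of B's comprehension: the record for `p` if `field` changed, else nothing
def checkB (original : List (String × List (String × String))) (field : String)
    (p : String × List (String × String)) : Option (List (String × String)) :=
  match original.lookup p.1 with
  | none => none
  | some orig =>
    if lkS orig field ≠ lkS p.2 field then
      some [("sunspec_name", p.1), ("vsn700", lkS p.2 "REST Name (VSN700)"),
            ("vsn300", lkS p.2 "REST Name (VSN300)"), ("old", lkS orig field),
            ("new", lkS p.2 field)]
    else none

-- B's `field_diffs`: a single filter-and-map pass over edited.items()
def fieldDiffs (original edited : List (String × List (String × String))) (field : String) :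
    List (List (String × String)) :=
  edited.filterMap (checkB original field)

def compare_data_alt (original : List (String × List (String × String))) (edited : List (String × List (String × String))) : List (String × List (List (String × String))) :=
  [("label", fieldDiffs original edited "Label"),
   ("description", fieldDiffs original edited "Description"),
   ("display_name", fieldDiffs original edited "HA Display Name")]

-- ===== PRECONDITION & SPEC =====
-- does the string dict d have key k?
def hasK (d : List (String × String)) (k : String) : Bool := (d.lookup k).isSome

-- Pre_ excludes exactly (a) inputs where the Python A raises KeyError — a matched point whose
-- rows lack one of the three compared fields, or differ in a field while the edited row lacks a
-- REST-name key (B raises on the same inputs) — and (b) association lists whose edited keys are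
-- not distinct, which do not arise from Python dicts.
def Pre_compare_data (original : List (String × List (String × String))) (edited : List (String × List (String × String))) : Prop :=
  (edited.map Prod.fst).Nodup ∧
  (edited.all (fun p =>
    match original.lookup p.1 with
    | none => true
    | some orig =>
      let edit := (edited.lookup p.1).getD []
      hasK orig "Label" && hasK orig "Description" && hasK orig "HA Display Name" &&
      hasK edit "Label" && hasK edit "Description" && hasK edit "HA Display Name" &&
      (!(lkS orig "Label" != lkS edit "Label" || lkS orig "Description" != lkS edit "Description" ||
         lkS orig "HA Display Name" != lkS edit "HA Display Name") ||
       (hasK edit "REST Name (VSN700)" && hasK edit "REST Name (VSN300)")))) = true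
instance (original : List (String × List (String × String))) (edited : List (String × List (String × String))) : Decidable (Pre_compare_data original edited) := by unfold Pre_compare_data; infer_instance

def pvWitness_compare_data : (List (String × List (String × String))) × (List (String × List (String × String))) :=
  ([("p1", [("Label", "A"), ("Description", "d"), ("HA Display Name", "h")])],
   [("p1", [("Label", "B"), ("Description", "d"), ("HA Display Name", "h"),
            ("REST Name (VSN700)", "r7"), ("REST Name (VSN300)", "r3")]),
    ("p2", [("Label", "X")])])

def Spec_compare_data (original : List (String × List (String × String))) (edited : List (String × List (String × String))) (out : List (String × List (List (String × String)))) : Prop := out = compare_data_alt original edited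
instance (original : List (String × List (String × String))) (edited : List (String × List (String × String))) (out : List (String × List (List (String × String)))) : Decidable (Spec_compare_data original edited out) := by unfold Spec_compare_data; infer_instance

-- ===== CLAIM (what is proved, stated in full; the proofs are below) =====
def Claim_equal_compare_data : Prop := ∀ (original : List (String × List (String × String))) (edited : List (String × List (String × String))), Dom_compare_data original edited → Pre_compare_data original edited → Spec_compare_data original edited (compare_data original edited)

-- ===== LEMMAS AND PROOFS =====

-- A-side per-field check, still looking `edit` up via edited[p.1] as A's loop body does
def checkA (original edited : List (String × List (String × String))) (field : String)
    (p : String × List (String × String)) : Option (List (String × String)) :=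
  match original.lookup p.1 with
  | none => none
  | some orig =>
    let edit := (edited.lookup p.1).getD []
    if lkS orig field ≠ lkS edit field then
      some [("sunspec_name", p.1), ("vsn700", lkS edit "REST Name (VSN700)"),
            ("vsn300", lkS edit "REST Name (VSN300)"), ("old", lkS orig field),
            ("new", lkS edit field)]
    else none

theorem foldl_stepA (original edited : List (String × List (String × String)))
    (l : List (String × List (String × String)))
    (acc : List (List (String × String)) × List (List (String × String)) × List (List (String × String))) :
    List.foldl (stepA original edited) acc l =
      (acc.1 ++ l.filterMap (checkA original edited "Label"),
       acc.2.1 ++ l.filterMap (checkA original edited "Description"),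
       acc.2.2 ++ l.filterMap (checkA original edited "HA Display Name")) := by
  induction l generalizing acc with
  | nil => simp
  | cons p l ih =>
    simp only [List.foldl_cons, ih, List.filterMap_cons]
    unfold stepA checkA
    cases h : original.lookup p.1 with
    | none => simp
    | some orig =>
      simp only []
      split_ifs <;> simp
  
theorem lookup_eq_of_nodup {β : Type} (l : List (String × β)) (p : String × β)
    (hn : (l.map Prod.fst).Nodup) (hp : p ∈ l) : l.lookup p.1 = some p.2 := by
  induction l with
  | nil => simp at hp
  | cons q l ih =>
    simp only [List.map_cons, List.nodup_cons] at hn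
    rcases List.mem_cons.mp hp with h | h
    · subst h; simp [List.lookup]
    · have hne : q.1 ≠ p.1 := by
        intro he
        exact hn.1 (he ▸ (List.mem_map.mpr ⟨p, h, rfl⟩))
      have hb : (p.1 == q.1) = false := by simpa using Ne.symm hne
      simp only [List.lookup, hb]
      exact ih hn.2 h

theorem checkA_eq_checkB (original edited : List (String × List (String × String)))
    (field : String) (hn : (edited.map Prod.fst).Nodup)
    (p : String × List (String × String)) (hp : p ∈ edited) :
    checkA original edited field p = checkB original field p := by
  unfold checkA checkB
  rw [lookup_eq_of_nodup edited p hn hp]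
  simp

theorem fieldDiffs_eq (original edited : List (String × List (String × String)))
    (field : String) (hn : (edited.map Prod.fst).Nodup) :
    edited.filterMap (checkA original edited field) = fieldDiffs original edited field := by
  unfold fieldDiffs
  exact List.filterMap_congr (fun p hp => checkA_eq_checkB original edited field hn p hp)

-- ===== VERDICT (by name: the statement is the Claim_ definition above) =====
theorem compare_data_spec : Claim_equal_compare_data := by
  intro original edited _ hpre
  unfold Spec_compare_data compare_data compare_data_alt
  rw [foldl_stepA]
  simp only [List.nil_append]
  rw [fieldDiffs_eq original edited "Label" hpre.1,
      fieldDiffs_eq original edited "Description" hpre.1,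
      fieldDiffs_eq original edited "HA Display Name" hpre.1]
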